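-- pv_equiv track=rewrite | github.com/msislab/membrane_crack_Anom | burROI_dataPrep.py | getCrop_offsets
-- ===== SOURCE A (Python) =====
-- def getCrop_offsets(pins=[], roiBox=[]):
--     pinPoses = []
--     x1, y1, w, h = int(roiBox[0]), int(roiBox[1]), int(roiBox[2]), int(roiBox[3])
--     roiH = h-y1
--     for pin in pins:
--         x2 = int(((pin[0]+pin[2])/2)-5)
--         y2 = int(y1 + (roiH/2))
--         pinPoses.append([x1, y1, x2,y2])
--         pinPoses.append([x1, y2, x2,h])
--         x1 = x2
--     # pinPoses.append([x1, int(y1/2), w, h])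
--     y2 = int(y1 + (roiH/2))
--     pinPoses.append([x1, y1, w, y2])
--     pinPoses.append([x1, y2, w, h])
--     return pinPoses
-- ===== SOURCE B (Python) =====
-- def getCrop_offsets(pins=[], roiBox=[]):
--     x1, y1, w, h = int(roiBox[0]), int(roiBox[1]), int(roiBox[2]), int(roiBox[3])
--     y2 = int(y1 + (h - y1) / 2)
--     mids = [int(((p[0] + p[2]) / 2) - 5) for p in pins]
--     lefts = [x1] + mids
--     rights = mids + [w]
--     out = []
--     for L, R in zip(lefts, rights):
--         out.append([L, y1, R, y2])
--         out.append([L, y2, R, h])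
--     return out
-- ===== Notes on version B (the rewrite author's own statement) =====
-- stated objective: simpler
-- what changed: Replaces the stateful loop that carries the previous x-cut across iterations (plus a duplicated trailing-box epilogue) by precomputing the list of mid cuts once, pairing shifted boundary lists lefts/rights with zip, and emitting both boxes per segment in one uniform pass with no carried state and no special-cased tail.
import Mathlib
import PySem

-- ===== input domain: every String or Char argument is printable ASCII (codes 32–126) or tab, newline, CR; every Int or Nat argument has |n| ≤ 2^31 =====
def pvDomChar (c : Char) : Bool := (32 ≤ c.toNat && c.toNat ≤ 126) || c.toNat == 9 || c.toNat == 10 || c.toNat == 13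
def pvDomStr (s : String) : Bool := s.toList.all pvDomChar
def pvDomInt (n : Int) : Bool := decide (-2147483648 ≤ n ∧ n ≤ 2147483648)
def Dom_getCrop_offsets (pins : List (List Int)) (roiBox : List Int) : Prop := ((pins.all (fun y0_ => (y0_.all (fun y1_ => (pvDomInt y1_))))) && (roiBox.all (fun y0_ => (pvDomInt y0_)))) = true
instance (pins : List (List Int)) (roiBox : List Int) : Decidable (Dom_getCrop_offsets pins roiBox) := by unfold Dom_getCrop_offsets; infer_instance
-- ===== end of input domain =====

-- ===== PORT A =====
-- B rewrites the carried-x1 loop with an epilogue as a zip over precomputed boundary lists (simpler, no carried state).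
-- int(v) on the exact .0/.5-valued floats here is truncation toward zero: Int.tdiv (doubled numerator) 2 (exact, |values| ≤ 2^33 < 2^53).
def getCrop_offsets (pins : List (List Int)) (roiBox : List Int) : List (List Int) :=
  let x1 := PySem.List.pyGetD roiBox 0 0
  let y1 := PySem.List.pyGetD roiBox 1 0
  let w  := PySem.List.pyGetD roiBox 2 0
  let h  := PySem.List.pyGetD roiBox 3 0
  let roiH := h - y1
  let st := pins.foldl (fun (s : List (List Int) × Int) pin =>
      let x2 := (PySem.List.pyGetD pin 0 0 + PySem.List.pyGetD pin 2 0 - 10).tdiv 2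
      let y2 := (2 * y1 + roiH).tdiv 2
      (s.1 ++ [[s.2, y1, x2, y2], [s.2, y2, x2, h]], x2)) ([], x1)
  let y2 := (2 * y1 + roiH).tdiv 2
  st.1 ++ [[st.2, y1, w, y2], [st.2, y2, w, h]]

-- ===== PORT B =====
def getCrop_offsets_alt (pins : List (List Int)) (roiBox : List Int) : List (List Int) :=
  let x1 := PySem.List.pyGetD roiBox 0 0
  let y1 := PySem.List.pyGetD roiBox 1 0
  let w  := PySem.List.pyGetD roiBox 2 0
  let h  := PySem.List.pyGetD roiBox 3 0
  let y2 := (y1 + h).tdiv 2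
  let mids := pins.map (fun p => (PySem.List.pyGetD p 0 0 + PySem.List.pyGetD p 2 0 - 10).tdiv 2)
  let lefts := x1 :: mids
  let rights := mids ++ [w]
  (lefts.zip rights).foldl (fun out LR =>
    out ++ [[LR.1, y1, LR.2, y2], [LR.1, y2, LR.2, h]]) []

-- ===== PRECONDITION & SPEC =====
-- Pre_ excludes exactly the inputs where A raises IndexError: roiBox shorter than 4, or a pin shorter than 3.
def Pre_getCrop_offsets (pins : List (List Int)) (roiBox : List Int) : Prop :=
  4 ≤ roiBox.length ∧ ∀ pin ∈ pins, 3 ≤ pin.length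
instance (pins : List (List Int)) (roiBox : List Int) : Decidable (Pre_getCrop_offsets pins roiBox) := by unfold Pre_getCrop_offsets; infer_instance
def pvWitness_getCrop_offsets : List (List Int) × List Int := ([[1, 2, 3], [4, 5, 6]], [0, 0, 20, 10])

def Spec_getCrop_offsets (pins : List (List Int)) (roiBox : List Int) (out : List (List Int)) : Prop := out = getCrop_offsets_alt pins roiBox
instance (pins : List (List Int)) (roiBox : List Int) (out : List (List Int)) : Decidable (Spec_getCrop_offsets pins roiBox out) := by unfold Spec_getCrop_offsets; infer_instance

-- ===== CLAIM (what is proved, stated in full; the proofs are below) =====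
def Claim_equal_getCrop_offsets : Prop := ∀ (pins : List (List Int)) (roiBox : List Int), Dom_getCrop_offsets pins roiBox → Pre_getCrop_offsets pins roiBox → Spec_getCrop_offsets pins roiBox (getCrop_offsets pins roiBox)

-- ===== LEMMAS AND PROOFS =====

theorem crop_key (f : List Int → Int) (y1 y2 h w : Int) :
    ∀ (pins : List (List Int)) (x1 : Int) (acc : List (List Int)),
    (let st := pins.foldl (fun (s : List (List Int) × Int) pin =>
        (s.1 ++ [[s.2, y1, f pin, y2], [s.2, y2, f pin, h]], f pin)) (acc, x1)
     st.1 ++ [[st.2, y1, w, y2], [st.2, y2, w, h]])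
    = acc ++ ((x1 :: pins.map f).zip (pins.map f ++ [w])).flatMap
        (fun LR => [[LR.1, y1, LR.2, y2], [LR.1, y2, LR.2, h]]) := by
  intro pins
  induction pins with
  | nil => intro x1 acc; simp
  | cons p rest ih =>
    intro x1 acc
    simp only [List.foldl_cons, List.map_cons, List.zip_cons_cons, List.flatMap_cons,
      List.cons_append]
    rw [ih (f p) (acc ++ [[x1, y1, f p, y2], [x1, y2, f p, h]])]
    simp

theorem getCrop_offsets_spec : Claim_equal_getCrop_offsets := by
  intro pins roiBox _ _
  unfold Spec_getCrop_offsets getCrop_offsets getCrop_offsets_alt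
  simp only []
  rw [crop_key, PySem.List.foldl_append_eq_flatMap]
  have : 2 * PySem.List.pyGetD roiBox 1 0 +
      (PySem.List.pyGetD roiBox 3 0 - PySem.List.pyGetD roiBox 1 0)
      = PySem.List.pyGetD roiBox 1 0 + PySem.List.pyGetD roiBox 3 0 := by ring
  rw [this]
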